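-- pv_equiv track=rewrite | github.com/dimitree2k/nanobot-stack | nanobot/adapters/responder_llm.py | _is_probably_german
-- ===== SOURCE A (Python) =====
-- def _is_probably_german(text: str) -> bool:
--     lowered = f" {text.lower()} "
--     de_markers = (
--         " und ",
--         " der ",
--         " die ",
--         " das ",
--         " ist ",
--         " nicht ",
--         " was ",
--         " wie ",
--         " heute ",
--         " kann ",
--         " kannst ",
--         " bitte ",
--         " danke ",
--     )
--     en_markers = (
--         " the ",
--         " and ",
--         " is ",
--         " not ",
--         " what ",
--         " how ",
--         " today ",
--         " can ",
--         " please ",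
--         " thanks ",
--     )
--     de_score = sum(1 for marker in de_markers if marker in lowered)
--     en_score = sum(1 for marker in en_markers if marker in lowered)
--     return de_score >= en_score
-- ===== SOURCE B (Python) =====
-- _DE = frozenset(("und", "der", "die", "das", "ist", "nicht", "was", "wie",
--                  "heute", "kann", "kannst", "bitte", "danke"))
-- _EN = frozenset(("the", "and", "is", "not", "what", "how", "today", "can",
--                  "please", "thanks"))
--
--
-- def _is_probably_german(text: str) -> bool:
--     # Single pass over the DISTINCT tokens (split on the literal space char,
--     # matching the original's " marker " substring semantics), keeping two
--     # counters; iterates over the data instead of over the marker lists.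
--     de = en = 0
--     for w in dict.fromkeys(text.lower().split(' ')):
--         if w in _DE:
--             de += 1
--         elif w in _EN:
--             en += 1
--     return de >= en
-- ===== Notes on version B (the rewrite author's own statement) =====
-- stated objective: idiomatic
-- what changed: B tokenizes the lowered text once on the literal space character and makes a single pass over the distinct tokens with two counters (if w in DE / elif w in EN), instead of A's 23 separate substring scans of the padded string, one per marker.
import Mathlib
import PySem

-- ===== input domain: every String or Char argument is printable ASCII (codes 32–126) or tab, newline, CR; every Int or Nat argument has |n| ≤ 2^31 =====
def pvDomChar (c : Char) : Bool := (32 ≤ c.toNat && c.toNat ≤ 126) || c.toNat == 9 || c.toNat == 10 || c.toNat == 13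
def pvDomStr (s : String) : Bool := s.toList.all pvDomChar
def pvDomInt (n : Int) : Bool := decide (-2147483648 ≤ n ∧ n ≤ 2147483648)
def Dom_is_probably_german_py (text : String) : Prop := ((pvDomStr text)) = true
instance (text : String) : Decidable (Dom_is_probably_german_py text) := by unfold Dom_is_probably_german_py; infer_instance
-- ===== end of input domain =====

-- B replaces A's 23 per-marker substring scans of the padded string by one tokenization
-- (split on the literal space character) and a single pass over the distinct tokens with
-- two counters (objective: idiomatic).

-- ===== PORT A =====
-- Literal port of A; strings handled as List Char (PySem.Chars), " {x} " built as [' '] ++ x ++ [' '].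
def is_probably_german_py (text : String) : Bool :=
  let lowered : List Char := [' '] ++ PySem.Chars.lower text.toList ++ [' ']
  let de_markers : List (List Char) :=
    [" und ".toList, " der ".toList, " die ".toList, " das ".toList, " ist ".toList,
     " nicht ".toList, " was ".toList, " wie ".toList, " heute ".toList, " kann ".toList,
     " kannst ".toList, " bitte ".toList, " danke ".toList]
  let en_markers : List (List Char) :=
    [" the ".toList, " and ".toList, " is ".toList, " not ".toList, " what ".toList,
     " how ".toList, " today ".toList, " can ".toList, " please ".toList, " thanks ".toList]
  let de_score : Int :=
    de_markers.foldl (fun acc marker => if PySem.Chars.isIn marker lowered then acc + 1 else acc) 0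
  let en_score : Int :=
    en_markers.foldl (fun acc marker => if PySem.Chars.isIn marker lowered then acc + 1 else acc) 0
  decide (en_score ≤ de_score)

-- ===== PORT B =====
-- B-side helpers: the module-level frozensets _DE and _EN of Source B.
def pvDeWords : List (List Char) :=
  ["und".toList, "der".toList, "die".toList, "das".toList, "ist".toList,
   "nicht".toList, "was".toList, "wie".toList, "heute".toList, "kann".toList,
   "kannst".toList, "bitte".toList, "danke".toList]

def pvEnWords : List (List Char) :=
  ["the".toList, "and".toList, "is".toList, "not".toList, "what".toList,
   "how".toList, "today".toList, "can".toList, "please".toList, "thanks".toList]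

-- Single pass over dict.fromkeys(text.lower().split(' ')) with two counters.
def is_probably_german_py_alt (text : String) : Bool :=
  let toks : List (List Char) :=
    PySem.List.dedup (PySem.Chars.splitOn (PySem.Chars.lower text.toList) [' '])
  let scores : Int × Int :=
    toks.foldl (fun (s : Int × Int) w =>
      if pvDeWords.contains w then (s.1 + 1, s.2)
      else if pvEnWords.contains w then (s.1, s.2 + 1)
      else s) (0, 0)
  decide (scores.2 ≤ scores.1)

-- ===== PRECONDITION & SPEC =====
def Spec_is_probably_german_py (text : String) (out : Bool) : Prop := out = is_probably_german_py_alt text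
instance (text : String) (out : Bool) : Decidable (Spec_is_probably_german_py text out) := by unfold Spec_is_probably_german_py; infer_instance

-- ===== CLAIM (what is proved, stated in full; the proofs are below) =====
def Claim_equal_is_probably_german_py : Prop := ∀ (text : String), Dom_is_probably_german_py text → Spec_is_probably_german_py text (is_probably_german_py text)

-- ===== LEMMAS AND PROOFS =====

-- Reference structural split on the single space character (proof-side mirror of splitOn s [' ']).
def pvSplit : List Char → List Char → List (List Char)
  | cur, [] => [cur.reverse]
  | cur, c :: rest => if c = ' ' then cur.reverse :: pvSplit [] rest else pvSplit (c :: cur) rest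

theorem pvSplit_go (l : List Char) : ∀ (fuel : Nat), l.length ≤ fuel →
    ∀ (cur : List Char) (acc : List (List Char)),
    PySem.Chars.splitOn.go [' '] fuel l cur acc = acc.reverse ++ pvSplit cur l := by
  induction l with
  | nil =>
    intro fuel _ cur acc
    cases fuel <;> simp [PySem.Chars.splitOn.go, pvSplit]
  | cons c rest ih =>
    intro fuel hlen cur acc
    cases fuel with
    | zero => simp at hlen
    | succ f =>
      by_cases hc : c = ' '
      · subst hc
        simp only [PySem.Chars.splitOn.go, pvSplit, if_pos (by simp : ([' '] : List Char).isPrefixOf (' ' :: rest) = true), if_true]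
        simp only [List.length_singleton, List.drop_succ_cons, List.drop_zero]
        rw [ih f (by simpa using hlen) [] (cur.reverse :: acc)]
        simp
      · simp only [PySem.Chars.splitOn.go, pvSplit]
        rw [if_neg (by simp [List.isPrefixOf]; exact fun h => absurd h.symm hc), if_neg hc]
        exact ih f (by simpa using hlen) (c :: cur) acc

theorem splitOn_eq_pvSplit (s : List Char) : PySem.Chars.splitOn s [' '] = pvSplit [] s := by
  simpa using pvSplit_go s (s.length + 1) (by omega) [] []

theorem prefix_pad_iff (w : List Char) : ∀ (t : List Char), ' ' ∉ w →
    ((w ++ [' ']) <+: (t ++ [' ']) ↔ w = t.takeWhile (· != ' ')) := by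
  induction w with
  | nil =>
    intro t _
    cases t with
    | nil => simp
    | cons d t' =>
      by_cases hd : d = ' '
      · subst hd; simp [List.cons_prefix_cons]
      · rw [List.nil_append, List.cons_append, List.cons_prefix_cons,
           List.takeWhile_cons_of_pos (by simp [hd])]
        constructor
        · rintro ⟨h, -⟩; exact absurd h.symm hd
        · intro h; exact absurd h.symm (List.cons_ne_nil _ _)
  | cons c w' ih =>
    intro t hw
    have hc : c ≠ ' ' := by intro h; exact hw (by simp [h])
    have hw' : ' ' ∉ w' := fun h => hw (by simp [h])
    cases t with
    | nil =>
      constructor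
      · intro h
        rw [List.nil_append, List.cons_append, List.cons_prefix_cons] at h
        exact absurd h.1 hc
      · intro h; simp [List.takeWhile] at h
    | cons d t' =>
      by_cases hd : d = ' '
      · subst hd
        constructor
        · intro h
          rw [List.cons_append, List.cons_append, List.cons_prefix_cons] at h
          exact absurd h.1 hc
        · intro h; simp at h
      · rw [List.cons_append, List.cons_append, List.cons_prefix_cons]
        have htw : (d :: t').takeWhile (· != ' ') = d :: t'.takeWhile (· != ' ') :=
          List.takeWhile_cons_of_pos (by simp [hd])
        rw [htw]
        constructor
        · rintro ⟨rfl, h⟩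
          rw [(ih t' hw').1 h]
        · intro h
          obtain ⟨h1, h2⟩ := List.cons.injEq c w' d _ ▸ h
          exact ⟨h1, (ih t' hw').2 h2⟩

-- The token list after the first space (empty when there is no space).
def pvTail (t : List Char) : List (List Char) :=
  match t.dropWhile (· != ' ') with
  | [] => []
  | _ :: r => pvSplit [] r

theorem pvSplit_decomp : ∀ (t cur : List Char),
    pvSplit cur t = (cur.reverse ++ t.takeWhile (· != ' ')) :: pvTail t := by
  intro t
  induction t with
  | nil => intro cur; simp [pvSplit, pvTail, List.dropWhile]
  | cons c rest ih =>
    intro cur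
    by_cases hc : c = ' '
    · subst hc
      simp [pvSplit, pvTail]
    · simp only [pvSplit, if_neg hc]
      rw [ih (c :: cur)]
      simp [pvTail, hc]

theorem infix_tail_iff (w : List Char) (hw : ' ' ∉ w) : ∀ (t : List Char),
    ((' ' :: (w ++ [' '])) <:+: (t ++ [' ']) ↔ w ∈ pvTail t) := by
  intro t
  induction t with
  | nil =>
    constructor
    · intro h
      have := h.length_le
      simp at this
    · intro h; simp [pvTail, List.dropWhile] at h
  | cons c t' ih =>
    rw [List.cons_append, List.infix_cons_iff]
    by_cases hc : c = ' '
    · subst hc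
      have hTail : pvTail (' ' :: t') = pvSplit [] t' := by
        simp [pvTail]
      rw [hTail, pvSplit_decomp t' []]
      constructor
      · rintro (h | h)
        · rw [List.cons_prefix_cons] at h
          have := (prefix_pad_iff w t' hw).1 h.2
          simp [this]
        · rcases (ih).1 h with hmem
          simp [hmem]
      · intro h
        rcases List.mem_cons.1 h with h1 | h2
        · exact Or.inl (by rw [List.cons_prefix_cons]
                           exact ⟨rfl, (prefix_pad_iff w t' hw).2 (by simpa using h1)⟩)
        · exact Or.inr ((ih).2 h2)
    · have hTail : pvTail (c :: t') = pvTail t' := by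
        unfold pvTail
        rw [List.dropWhile_cons_of_pos (by simp [hc])]
      rw [hTail]
      constructor
      · rintro (h | h)
        · rw [List.cons_prefix_cons] at h
          exact absurd h.1.symm hc
        · exact (ih).1 h
      · intro h
        exact Or.inr ((ih).2 h)

theorem marker_iff_token (w L : List Char) (hw : ' ' ∉ w) :
    PySem.Chars.isIn (' ' :: (w ++ [' '])) (' ' :: (L ++ [' '])) = decide (w ∈ pvSplit [] L) := by
  by_cases h : w ∈ pvSplit [] L
  · rw [decide_eq_true h]
    rw [PySem.Chars.isIn_iff_infix]
    rw [List.infix_cons_iff]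
    rw [pvSplit_decomp L []] at h
    rcases List.mem_cons.1 h with h1 | h2
    · exact Or.inl (by rw [List.cons_prefix_cons]
                       exact ⟨rfl, (prefix_pad_iff w L hw).2 (by simpa using h1)⟩)
    · exact Or.inr ((infix_tail_iff w hw L).2 h2)
  · rw [decide_eq_false h]
    rw [PySem.Chars.isIn_eq_false_iff]
    intro hinf
    apply h
    rw [List.infix_cons_iff] at hinf
    rw [pvSplit_decomp L []]
    rcases hinf with h1 | h2
    · rw [List.cons_prefix_cons] at h1
      have := (prefix_pad_iff w L hw).1 h1.2
      simp [this]
    · exact List.mem_cons_of_mem _ ((infix_tail_iff w hw L).1 h2)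

-- Two nodup lists cross-count each other's members equally: both counts are |xs ∩ ys|.
theorem countP_mem_swap (xs ys : List (List Char)) (hx : xs.Nodup) (hy : ys.Nodup) :
    xs.countP (fun x => decide (x ∈ ys)) = ys.countP (fun y => decide (y ∈ xs)) := by
  rw [List.countP_eq_length_filter, List.countP_eq_length_filter]
  apply List.Perm.length_eq
  rw [List.perm_ext_iff_of_nodup (hx.filter _) (hy.filter _)]
  intro a
  simp only [List.mem_filter, decide_eq_true_eq]
  exact and_comm

-- B's single-pass pair fold computes the two membership counts over the token list.
theorem de_en_disjoint : ∀ w ∈ pvDeWords, w ∉ pvEnWords := by decide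

-- B's single-pass pair fold computes the two membership counts over the token list.
theorem pair_fold_counts : ∀ (toks : List (List Char)) (de en : Int),
    toks.foldl (fun (s : Int × Int) w =>
        if pvDeWords.contains w then (s.1 + 1, s.2)
        else if pvEnWords.contains w then (s.1, s.2 + 1)
        else s) (de, en)
      = (de + (toks.countP (fun w => decide (w ∈ pvDeWords)) : Int),
         en + (toks.countP (fun w => decide (w ∈ pvEnWords)) : Int)) := by
  intro toks
  induction toks with
  | nil => intro de en; simp
  | cons w rest ih =>
    intro de en
    rw [List.foldl_cons, List.countP_cons, List.countP_cons]
    by_cases hde : w ∈ pvDeWords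
    · have hen : w ∉ pvEnWords := de_en_disjoint w hde
      simp only [List.contains_iff_mem] at ih
      simp only [List.contains_iff_mem, hde, hen, decide_true, decide_false, if_true, if_false]
      rw [ih]
      simp only [Prod.mk.injEq]
      refine ⟨?_, ?_⟩ <;> push_cast <;> ring
    · by_cases hen : w ∈ pvEnWords
      · simp only [List.contains_iff_mem] at ih
        simp only [List.contains_iff_mem, hde, hen, decide_true, decide_false, if_true, if_false]
        rw [ih]
        simp only [Prod.mk.injEq]
        refine ⟨?_, ?_⟩ <;> push_cast <;> ring
      · simp only [List.contains_iff_mem] at ih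
        simp only [List.contains_iff_mem, hde, hen, decide_false, if_false]
        rw [ih]
        simp

-- A's per-marker score folds are the cross-counts over the token set.
theorem marker_fold_eq_count (ws : List (List Char)) (hws : ∀ w ∈ ws, ' ' ∉ w) (L : List Char) :
    (ws.map (fun w => ' ' :: (w ++ [' ']))).foldl
        (fun (acc : Int) m => if PySem.Chars.isIn m ([' '] ++ L ++ [' ']) then acc + 1 else acc) 0
      = (ws.countP (fun w =>
          decide (w ∈ PySem.List.dedup (PySem.Chars.splitOn L [' ']))) : Int) := by
  rw [List.foldl_map, PySem.List.foldl_if_add_one]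
  have hpad : ([' '] ++ L ++ [' '] : List Char) = ' ' :: (L ++ [' ']) := by simp
  have hcong : List.countP
        (fun w => PySem.Chars.isIn (' ' :: (w ++ [' '])) ([' '] ++ L ++ [' '])) ws
      = List.countP
        (fun w => decide (w ∈ PySem.List.dedup (PySem.Chars.splitOn L [' ']))) ws := by
    apply List.countP_congr
    intro w hwmem
    rw [hpad, marker_iff_token w L (hws w hwmem)]
    simp [splitOn_eq_pvSplit]
  rw [hcong]
  simp

-- ===== VERDICT (by name: the statement is the Claim_ definition above) =====
theorem is_probably_german_py_spec : Claim_equal_is_probably_german_py := by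
  intro text _
  unfold Spec_is_probably_german_py is_probably_german_py is_probably_german_py_alt
  set L := PySem.Chars.lower text.toList with hL
  have hde : ([" und ".toList, " der ".toList, " die ".toList, " das ".toList, " ist ".toList,
     " nicht ".toList, " was ".toList, " wie ".toList, " heute ".toList, " kann ".toList,
     " kannst ".toList, " bitte ".toList, " danke ".toList] : List (List Char)) =
      pvDeWords.map (fun w => ' ' :: (w ++ [' '])) := by decide
  have hen : ([" the ".toList, " and ".toList, " is ".toList, " not ".toList, " what ".toList,
     " how ".toList, " today ".toList, " can ".toList, " please ".toList, " thanks ".toList] :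
       List (List Char)) = pvEnWords.map (fun w => ' ' :: (w ++ [' '])) := by decide
  have hallde : ∀ w ∈ pvDeWords, ' ' ∉ w := by decide
  have hallen : ∀ w ∈ pvEnWords, ' ' ∉ w := by decide
  rw [hde, hen]
  dsimp only
  rw [marker_fold_eq_count pvDeWords hallde L, marker_fold_eq_count pvEnWords hallen L,
     pair_fold_counts]
  have hnodupToks : (PySem.List.dedup (PySem.Chars.splitOn L [' '])).Nodup := by
    rw [PySem.List.dedup_eq_ofList]
    exact PySem.Set.nodup_ofList _
  rw [countP_mem_swap pvDeWords _ (by decide) hnodupToks,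
     countP_mem_swap pvEnWords _ (by decide) hnodupToks]
  simp
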